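-- pv_equiv track=rewrite | github.com/PaddlePaddle/Paddle | python/paddle/distributed/auto_parallel/static/completion.py | compute_compatible_dims_mapping
-- ===== SOURCE A (Python) =====
-- def compute_compatible_dim_mapping(dim_mapping_list):
--     """Compute the compatible dim mapping given a list of dim mapping."""
--     if not dim_mapping_list:
--         return None
--
--     def _compute_compatible_dim_mapping_of_two(dm1, dm2):
--         if dm1 == -1:
--             return True, dm2
--         if dm2 == -1:
--             return True, dm1
--         if dm1 == dm2:
--             return True, dm1
--         return False, None
--
--     compatible_result = -1
--     for mapping in dim_mapping_list:
--         compatible, compatible_result = _compute_compatible_dim_mapping_of_two(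
--             compatible_result, mapping
--         )
--         if not compatible:
--             return None
--     return compatible_result
--
-- def compute_compatible_dims_mapping(dims_mapping_list):
--     """Compute the compatible dims mapping given a list of dims mapping.
--     Each of dims mapping is also a list.
--     """
--     if not dims_mapping_list:
--         return None
--     length = len(dims_mapping_list[0])
--     for dims_mapping in dims_mapping_list:
--         if dims_mapping is None:
--             return None
--         if len(dims_mapping) != length:
--             return None
--     compatible_result = []
--     for dim_mappings in zip(*dims_mapping_list):
--         compatible_dim_mapping = compute_compatible_dim_mapping(
--             list(dim_mappings)
--         )
--         if compatible_dim_mapping is None: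
--             return None
--         compatible_result.append(compatible_dim_mapping)
--     return compatible_result
-- ===== SOURCE B (Python) =====
-- def compute_compatible_dims_mapping(dims_mapping_list):
--     """Compute the compatible dims mapping given a list of dims mapping.
--     Each of dims mapping is also a list.
--     """
--     if not dims_mapping_list:
--         return None
--     length = len(dims_mapping_list[0])
--     if any(m is None or len(m) != length for m in dims_mapping_list):
--         return None
--     result = []
--     for i in range(length):
--         vals = {m[i] for m in dims_mapping_list if m[i] != -1}
--         if len(vals) > 1:
--             return None
--         result.append(vals.pop() if vals else -1)
--     return result
-- ===== Notes on version B (the rewrite author's own statement) =====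
-- stated objective: simpler
-- what changed: Replaces the stateful pairwise-merge fold (helper merging an accumulator with each entry) by a per-column distinct-non-wildcard set: each column is compatible iff it holds at most one value other than -1, which becomes the result (else -1).
import Mathlib
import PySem

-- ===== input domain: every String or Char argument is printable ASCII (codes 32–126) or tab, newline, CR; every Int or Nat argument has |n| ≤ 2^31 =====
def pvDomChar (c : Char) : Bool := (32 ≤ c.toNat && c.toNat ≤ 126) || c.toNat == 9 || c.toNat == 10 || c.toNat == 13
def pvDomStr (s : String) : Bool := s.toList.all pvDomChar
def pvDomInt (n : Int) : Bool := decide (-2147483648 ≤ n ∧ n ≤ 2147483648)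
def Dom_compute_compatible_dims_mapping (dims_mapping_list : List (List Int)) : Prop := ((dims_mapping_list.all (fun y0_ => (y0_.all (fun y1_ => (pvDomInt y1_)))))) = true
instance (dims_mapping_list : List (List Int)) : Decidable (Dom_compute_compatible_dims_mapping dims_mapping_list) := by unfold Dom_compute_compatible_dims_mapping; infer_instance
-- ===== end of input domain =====

-- B replaces A's stateful pairwise-merge fold by a per-column "set of non-(-1) values" check; same cost, simpler.

-- ===== PORT A =====
-- helper _compute_compatible_dim_mapping_of_two
def pvMergeTwo (dm1 dm2 : Int) : Bool × Option Int :=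
  if dm1 = -1 then (true, some dm2)
  else if dm2 = -1 then (true, some dm1)
  else if dm1 = dm2 then (true, some dm1)
  else (false, none)

-- the 'for mapping in dim_mapping_list' loop of compute_compatible_dim_mapping
def pvLoopA (acc : Int) : List Int → Option Int
  | [] => some acc
  | m :: rest =>
    match pvMergeTwo acc m with
    | (true, some r) => pvLoopA r rest
    | _ => none

-- compute_compatible_dim_mapping
def pvCCDM (l : List Int) : Option Int :=
  if l.isEmpty then none else pvLoopA (-1) l

-- termination helper for the zip(*...) port (cited by decreasing_by)
theorem pvSumLen_tail_le : ∀ (ls : List (List Int)),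
    ((ls.map List.tail).map List.length).sum ≤ ((ls.map List.length)).sum := by
  intro ls
  induction ls with
  | nil => simp
  | cons x xs ih =>
    simp only [List.map_cons, List.sum_cons]
    have : x.tail.length ≤ x.length := by simp [List.length_tail]
    omega

theorem pvSumLen_tail_lt (ls : List (List Int))
    (h : (ls.isEmpty || ls.any List.isEmpty) = false) :
    ((ls.map List.tail).map List.length).sum < ((ls.map List.length)).sum := by
  cases ls with
  | nil => simp at h
  | cons x xs =>
    simp only [Bool.or_eq_false_iff, List.any_cons, List.isEmpty_eq_false_iff] at h
    have hx : x ≠ [] := by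
      intro hx; apply absurd h.2; simp [hx]
    have hxl : 0 < x.length := List.length_pos_iff.mpr hx
    have := pvSumLen_tail_le xs
    simp only [List.map_cons, List.sum_cons, List.length_tail]
    omega

-- zip(*dims_mapping_list): columns while every list is nonempty
def pvZipStar (ls : List (List Int)) : List (List Int) :=
  if h : (ls.isEmpty || ls.any List.isEmpty) = true then []
  else (ls.map List.headI) :: pvZipStar (ls.map List.tail)
termination_by ((ls.map List.length)).sum
decreasing_by simpa using pvSumLen_tail_lt ls (eq_false_of_ne_true h)

-- the 'for dim_mappings in zip(*...)' loop with its early return and append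
def pvLoopCols : List (List Int) → List Int → Option (List Int)
  | [], acc => some acc
  | c :: cs, acc =>
    match pvCCDM c with
    | none => none
    | some v => pvLoopCols cs (acc ++ [v])

def compute_compatible_dims_mapping (dims_mapping_list : List (List Int)) : Option (List Int) :=
  match dims_mapping_list with
  | [] => none
  | first :: _ =>
    -- the 'is None' branch of the Python is unreachable under the type List (List Int)
    if dims_mapping_list.all (fun d => d.length == first.length) then
      pvLoopCols (pvZipStar dims_mapping_list) []
    else none

-- ===== PORT B =====
-- one column: the set of values other than -1; >1 distinct → incompatible, else that value or -1
def pvColMerge (c : List Int) : Option Int :=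
  let vals := PySem.Set.ofList (c.filter (fun v => v != -1))
  if 1 < vals.length then none else some (vals.headD (-1))

def compute_compatible_dims_mapping_alt (dims_mapping_list : List (List Int)) : Option (List Int) :=
  match dims_mapping_list with
  | [] => none
  | first :: _ =>
    if dims_mapping_list.any (fun m => m.length != first.length) then none
    else
      -- m[i] is exact as getD under the equal-length guard above
      (List.range first.length).mapM
        (fun i => pvColMerge (dims_mapping_list.map (fun m => m.getD i 0)))

-- ===== PRECONDITION & SPEC =====
def Spec_compute_compatible_dims_mapping (dims_mapping_list : List (List Int)) (out : Option (List Int)) : Prop := out = compute_compatible_dims_mapping_alt dims_mapping_list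
instance (dims_mapping_list : List (List Int)) (out : Option (List Int)) : Decidable (Spec_compute_compatible_dims_mapping dims_mapping_list out) := by unfold Spec_compute_compatible_dims_mapping; infer_instance

-- ===== CLAIM (what is proved, stated in full; the proofs are below) =====
def Claim_equal_compute_compatible_dims_mapping : Prop := ∀ (dims_mapping_list : List (List Int)), Dom_compute_compatible_dims_mapping dims_mapping_list → Spec_compute_compatible_dims_mapping dims_mapping_list (compute_compatible_dims_mapping dims_mapping_list)

-- ===== LEMMAS AND PROOFS =====

theorem pvColMerge_cons_neg_one (c : List Int) : pvColMerge (-1 :: c) = pvColMerge c := by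
  simp [pvColMerge]

theorem pvFoldl_add_length_le {α : Type} [BEq α] :
    ∀ (L : List α) (s : List α), s.length ≤ (L.foldl PySem.Set.add s).length := by
  intro L
  induction L with
  | nil => intro s; simp
  | cons x xs ih =>
    intro s
    simp only [List.foldl]
    have h1 : s.length ≤ (PySem.Set.add s x).length := by
      unfold PySem.Set.add; split <;> simp
    exact le_trans h1 (ih _)

-- the running pairwise merge equals the column-set check, with the accumulator consed on
theorem pvLoopA_eq_colMerge : ∀ (c : List Int) (acc : Int),
    pvLoopA acc c = pvColMerge (acc :: c) := by
  intro c
  induction c with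
  | nil =>
    intro acc
    by_cases h : acc = -1 <;>
      simp [pvLoopA, pvColMerge, h, PySem.Set.ofList, PySem.Set.add, PySem.Set.contains]
  | cons m rest ih =>
    intro acc
    by_cases h1 : acc = -1
    · subst h1
      have hm : pvMergeTwo (-1) m = (true, some m) := by simp [pvMergeTwo]
      simp only [pvLoopA, hm]
      rw [ih m, pvColMerge_cons_neg_one]
    · have hb1 : (acc != -1) = true := by simp [h1]
      by_cases h2 : m = -1
      · subst h2
        have hm : pvMergeTwo acc (-1) = (true, some acc) := by simp [pvMergeTwo, h1]
        simp only [pvLoopA, hm]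
        rw [ih acc]
        simp [pvColMerge, hb1]
      · have hb2 : (m != -1) = true := by simp [h2]
        by_cases h3 : acc = m
        · subst h3
          have hm : pvMergeTwo acc acc = (true, some acc) := by simp [pvMergeTwo, h1]
          simp only [pvLoopA, hm]
          rw [ih acc]
          simp [pvColMerge, hb1, PySem.Set.ofList_eq_foldl, List.filter,
                PySem.Set.add, PySem.Set.contains]
        · have hma : ¬ m = acc := fun h => h3 h.symm
          have hm : pvMergeTwo acc m = (false, none) := by simp [pvMergeTwo, h1, h2, h3]
          simp only [pvLoopA, hm]
          have hfil : (acc :: m :: rest).filter (fun v => v != -1)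
              = acc :: m :: rest.filter (fun v => v != -1) := by
            simp [List.filter, hb1, hb2]
          have hset : PySem.Set.ofList (acc :: m :: rest.filter (fun v => v != -1))
              = (rest.filter (fun v => v != -1)).foldl PySem.Set.add [acc, m] := by
            simp [PySem.Set.ofList_eq_foldl, List.foldl, PySem.Set.add,
                  PySem.Set.contains, hma]
          have hlen := pvFoldl_add_length_le (rest.filter (fun v => v != -1))
              ([acc, m] : List Int)
          simp only [List.length_cons, List.length_nil] at hlen
          simp only [pvColMerge, hfil, hset]
          rw [if_pos (by omega)]

theorem pvCCDM_eq_colMerge (c : List Int) (h : c ≠ []) : pvCCDM c = pvColMerge c := by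
  cases c with
  | nil => exact absurd rfl h
  | cons x xs =>
    show pvLoopA (-1) (x :: xs) = _
    rw [pvLoopA_eq_colMerge, pvColMerge_cons_neg_one]

-- zip(*l) is the list of columns when all rows have length n
theorem pvZipStar_eq_cols : ∀ (n : Nat) (l : List (List Int)), l ≠ [] →
    (∀ m ∈ l, m.length = n) →
    pvZipStar l = (List.range n).map (fun i => l.map (fun m => m.getD i 0)) := by
  intro n
  induction n with
  | zero =>
    intro l hne hlen
    unfold pvZipStar
    rw [dif_pos]
    · simp
    · cases l with
      | nil => exact absurd rfl hne
      | cons x xs =>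
        have : x = [] := List.eq_nil_of_length_eq_zero (hlen x (by simp))
        simp [this]
  | succ n ih =>
    intro l hne hlen
    unfold pvZipStar
    rw [dif_neg]
    · have htl : ∀ m ∈ l.map List.tail, m.length = n := by
        intro m hm
        obtain ⟨m', hm', rfl⟩ := List.mem_map.mp hm
        have := hlen m' hm'
        simp [List.length_tail, this]
      rw [ih (l.map List.tail) (by simpa using hne) htl]
      rw [List.range_succ_eq_map]
      simp only [List.map_cons, List.map_map]
      congr 1
      · apply List.map_congr_left
        intro m hm
        have hl := hlen m hm
        cases m with
        | nil => simp at hl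
        | cons a t => simp [List.headI, List.getD]
      · apply List.map_congr_left
        intro i _
        apply List.map_congr_left
        intro m _
        simp
    · simp only [Bool.or_eq_true, not_or]
      refine ⟨by simpa using hne, ?_⟩
      intro hany
      rcases List.any_eq_true.mp hany with ⟨m, hm, hemp⟩
      have hl := hlen m hm
      rw [List.isEmpty_iff.mp hemp] at hl
      simp at hl

-- A's early-return-and-append loop as mapM with the accumulator prepended
theorem pvLoopCols_eq_mapM : ∀ (cs : List (List Int)) (acc : List Int),
    (∀ c ∈ cs, c ≠ []) →
    pvLoopCols cs acc = (cs.mapM pvColMerge).map (fun r => acc ++ r) := by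
  intro cs
  induction cs with
  | nil => intro acc _; simp [pvLoopCols]
  | cons c cs ih =>
    intro acc hne
    have h1 : pvCCDM c = pvColMerge c := pvCCDM_eq_colMerge c (hne c (by simp))
    have h2 := fun v => ih (acc ++ [v]) (fun c hc => hne c (by simp [hc]))
    cases hv : pvColMerge c with
    | none => simp [pvLoopCols, h1, hv, List.mapM_cons]
    | some v =>
      cases hr : cs.mapM pvColMerge with
      | none => simp [pvLoopCols, h1, hv, List.mapM_cons, h2 v, hr]
      | some rs => simp [pvLoopCols, h1, hv, List.mapM_cons, h2 v, hr]

theorem pvMapM_map {α β γ : Type} (g : α → β) (f : β → Option γ) :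
    ∀ (xs : List α), List.mapM f (xs.map g) = xs.mapM (fun x => f (g x)) := by
  intro xs
  induction xs with
  | nil => simp
  | cons x xs ih => simp [List.mapM_cons, ih]

-- ===== VERDICT (by name: the statement is the Claim_ definition above) =====
theorem compute_compatible_dims_mapping_spec : Claim_equal_compute_compatible_dims_mapping := by
  intro l _
  unfold Spec_compute_compatible_dims_mapping
  cases l with
  | nil => rfl
  | cons first rest =>
    simp only [compute_compatible_dims_mapping, compute_compatible_dims_mapping_alt]
    by_cases hlen : ∀ m ∈ first :: rest, m.length = first.length
    · rw [if_pos (by simpa [List.all_eq_true] using hlen)]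
      rw [if_neg (by simp only [List.any_eq_true, bne_iff_ne, ne_eq, not_exists, not_and,
            not_not]; exact fun m hm => hlen m hm)]
      rw [pvZipStar_eq_cols first.length (first :: rest) (by simp) hlen]
      have hcols : ∀ c ∈ (List.range first.length).map
          (fun i => (first :: rest).map (fun m => m.getD i 0)), c ≠ [] := by
        intro c hc
        obtain ⟨i, _, rfl⟩ := List.mem_map.mp hc
        simp
      rw [pvLoopCols_eq_mapM _ [] hcols]
      rw [pvMapM_map]
      cases h : (List.range first.length).mapM
          (fun i => pvColMerge ((first :: rest).map (fun m => m.getD i 0))) <;> simp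
    · have ha : ((first :: rest).all fun d => d.length == first.length) = false := by
        rw [Bool.eq_false_iff]
        intro hall
        exact hlen (by simpa [List.all_eq_true] using hall)
      have hb : ((first :: rest).any fun m => m.length != first.length) = true := by
        simp only [List.any_eq_true, bne_iff_ne]
        by_contra hc
        exact hlen (fun m hm => by
          by_cases h : m.length = first.length
          · exact h
          · exact absurd ⟨m, hm, h⟩ hc)
      rw [if_neg (by simp [ha]), if_pos hb]
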